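-- pv_equiv track=rewrite | github.com/BhavithaS/Typeface.ai-answers | 3.py | LCD_series
-- ===== SOURCE A (Python) =====
-- def LCD_series(n) :
--     good_num = {0,1,2,5,6,8,9}
--     i = 0
--     j = 1
--     while i!= n :
--         s = set(list(map(int,str(j))))
--         if s.issubset(good_num) :
--             i += 1
--         j += 1
--     return j-1
-- ===== SOURCE B (Python) =====
-- def LCD_series(n):
--     # n-th positive integer whose decimal digits all lie in {0,1,2,5,6,8,9}:
--     # there are exactly 7^k - 1 such numbers below 10^k, so the n-th one is
--     # the base-7 representation of n read through the sorted allowed digits.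
--     digits = [0, 1, 2, 5, 6, 8, 9]
--     r = 0
--     p = 1
--     while n > 0:
--         n, d = divmod(n, 7)
--         r += digits[d] * p
--         p *= 10
--     return r
-- ===== Notes on version B (the rewrite author's own statement) =====
-- stated objective: faster
-- what changed: A scans every integer upward, string-testing each one's digits until it has seen n good numbers; B computes the answer directly as the base-7 representation of n read through the 7 allowed digits, with no search at all.
import Mathlib
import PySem

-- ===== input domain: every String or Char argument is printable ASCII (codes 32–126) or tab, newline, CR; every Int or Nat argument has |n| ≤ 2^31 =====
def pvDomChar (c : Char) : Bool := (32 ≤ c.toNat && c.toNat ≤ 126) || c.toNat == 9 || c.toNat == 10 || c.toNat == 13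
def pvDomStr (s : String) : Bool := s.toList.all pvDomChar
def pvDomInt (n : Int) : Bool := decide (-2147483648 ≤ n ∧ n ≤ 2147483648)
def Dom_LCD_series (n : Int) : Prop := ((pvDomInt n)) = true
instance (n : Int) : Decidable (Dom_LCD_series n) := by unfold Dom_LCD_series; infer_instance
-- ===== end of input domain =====

-- B replaces A's linear upward scan (string-testing every integer) by direct positional
-- construction: the n-th number with all digits in {0,1,2,5,6,8,9} is the base-7
-- representation of n read through the sorted list of the 7 allowed digits.

-- ===== PORT A =====
-- s = set(list(map(int, str(j)))); s.issubset({0,1,2,5,6,8,9}).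
-- int(c) is ported as (ofStr? (singleton c)).getD 0: exact here because str(j) of the
-- j ≥ 1 reached by the loop consists of digit characters only, so int never raises.
def pyGood (j : Int) : Bool :=
  PySem.Set.issubset
    (PySem.Set.ofList ((PySem.Int.toStr j).toList.map
      (fun c => (PySem.Int.ofStr? (String.singleton c)).getD 0)))
    (PySem.Set.ofList ([0, 1, 2, 5, 6, 8, 9] : List Int))

-- while i != n: if good(j): i += 1; j += 1  — literal loop of A.
-- The fuel argument is a totality guard only: LCD_series passes 10^(n+1), which the
-- equivalence proof shows is never exhausted for the n ≥ 0 admitted by Pre_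
-- (on n < 0 Python's loop never terminates, and Pre_ excludes those inputs).
def lcdGo (fuel : Nat) (n i j : Int) : Int :=
  match fuel with
  | 0 => j - 1
  | fuel + 1 =>
    if i = n then j - 1
    else if pyGood j then lcdGo fuel n (i + 1) (j + 1) else lcdGo fuel n i (j + 1)

def LCD_series (n : Int) : Int := lcdGo (10 ^ (n.toNat + 1)) n 0 1

-- ===== PORT B =====
-- while n > 0: n, d = divmod(n, 7); r += digits[d] * p; p *= 10  — literal loop of B
def altLoop (n r p : Int) : Int :=
  if 0 < n then
    altLoop (PySem.Int.floordiv n 7)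
      (r + (PySem.List.pyGetD ([0, 1, 2, 5, 6, 8, 9] : List Int) (PySem.Int.mod n 7) 0) * p)
      (p * 10)
  else r
termination_by n.toNat
decreasing_by
  · simp only [PySem.Int.floordiv]
    rw [Int.fdiv_eq_ediv]
    simp only [show ((0:Int) ≤ 7 ∨ (7:Int) ∣ n) = True by simp, if_true]
    omega

def LCD_series_alt (n : Int) : Int := altLoop n 0 1

-- ===== PRECONDITION & SPEC =====
-- Pre_ excludes n < 0, on which Python's A loops forever (i never reaches n)
def Pre_LCD_series (n : Int) : Prop := 0 ≤ n
instance (n : Int) : Decidable (Pre_LCD_series n) := by unfold Pre_LCD_series; infer_instance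
def pvWitness_LCD_series : Int := (5)

def Spec_LCD_series (n : Int) (out : Int) : Prop := out = LCD_series_alt n
instance (n : Int) (out : Int) : Decidable (Spec_LCD_series n out) := by unfold Spec_LCD_series; infer_instance

-- ===== CLAIM (what is proved, stated in full; the proofs are below) =====
def Claim_equal_LCD_series : Prop := ∀ (n : Int), Dom_LCD_series n → Pre_LCD_series n → Spec_LCD_series n (LCD_series n)

-- ===== LEMMAS AND PROOFS =====

-- the allowed digits, as the sorted list of the Python set {0,1,2,5,6,8,9}
def goodL : List Nat := [0, 1, 2, 5, 6, 8, 9]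


-- the string-based digit test pyGood is exactly "every decimal digit is allowed"
lemma toDigitsCore_eq (fuel : ℕ) : ∀ (n : ℕ) (ds : List Char), n < fuel →
    Nat.toDigitsCore 10 fuel n ds =
      (if n = 0 then ['0'] else ((Nat.digits 10 n).map Nat.digitChar).reverse) ++ ds := by
  induction fuel with
  | zero => omega
  | succ fuel ih =>
    intro n ds hn
    rw [Nat.toDigitsCore]
    by_cases h0 : n = 0
    · subst h0; simp; decide
    by_cases h1 : n / 10 = 0
    · have hlt : n < 10 := by omega
      simp only [h1, if_pos, h0, if_neg]
      rw [Nat.digits_def' (by norm_num) (by omega), h1]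
      simp
    · simp only [h1, if_neg, h0]
      rw [ih (n / 10) _ (by omega)]
      rw [Nat.digits_def' (b := 10) (n := n) (by norm_num) (by omega)]
      simp [h1]
lemma toDigits_eq (n : ℕ) :
    Nat.toDigits 10 n = if n = 0 then ['0'] else ((Nat.digits 10 n).map Nat.digitChar).reverse := by
  rw [Nat.toDigits, toDigitsCore_eq _ _ _ (by omega), List.append_nil]
lemma charToInt_digitChar (d : ℕ) (hd : d < 10) :
    (PySem.Int.ofStr? (String.singleton (Nat.digitChar d))).getD 0 = (d : Int) := by
  interval_cases d <;> decide
lemma goodmem (d : ℕ) (hd : d < 10) :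
    ((Int.ofNat d) ∈ ([0, 1, 2, 5, 6, 8, 9] : List Int)) ↔ d ∈ goodL := by
  interval_cases d <;> decide
lemma pyGood_iff (j : Int) (hj : 1 ≤ j) :
    pyGood j = true ↔ ∀ d ∈ Nat.digits 10 j.toNat, d ∈ goodL := by
  unfold pyGood
  rw [PySem.Int.toList_toStr]
  have hne : ¬ j < 0 := by omega
  have htn : j.toNat ≠ 0 := by omega
  simp only [PySem.Int.toChars, hne, if_false]
  rw [toDigits_eq, if_neg htn]
  have hmap : (((Nat.digits 10 j.toNat).map Nat.digitChar).reverse.map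
      (fun c => (PySem.Int.ofStr? (String.singleton c)).getD 0)) =
      ((Nat.digits 10 j.toNat).map (fun d => Int.ofNat d)).reverse := by
    rw [List.map_reverse, List.map_map]
    congr 1
    apply List.map_congr_left
    intro d hd
    exact charToInt_digitChar d (Nat.digits_lt_base (by norm_num) hd)
  rw [hmap]
  simp only [PySem.Set.issubset, PySem.Set.contains, List.all_eq_true]
  constructor
  · intro h d hd
    have := h (Int.ofNat d) (by rw [PySem.Set.mem_ofList]; simp only [List.mem_reverse, List.mem_map]; exact ⟨d, hd, rfl⟩)
    rw [List.contains_eq_mem, decide_eq_true_iff, PySem.Set.mem_ofList] at this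
    exact (goodmem d (Nat.digits_lt_base (by norm_num) hd)).mp this
  · intro h x hx
    rw [PySem.Set.mem_ofList] at hx
    simp only [List.mem_reverse, List.mem_map] at hx
    obtain ⟨d, hd, rfl⟩ := hx
    rw [List.contains_eq_mem, decide_eq_true_iff, PySem.Set.mem_ofList]
    exact (goodmem d (Nat.digits_lt_base (by norm_num) hd)).mpr (h d hd)

-- the n-th good number, as a Nat recursion (the mathematical content of B)
def DN (k : ℕ) : ℕ := goodL.getD k 0

def bN (n : ℕ) : ℕ :=
  if _h : n = 0 then 0 else 10 * bN (n / 7) + DN (n % 7)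
termination_by n
decreasing_by exact Nat.div_lt_self (by omega) (by omega)

lemma bN_zero : bN 0 = 0 := by simp [bN]

lemma bN_eq (n : ℕ) (h : n ≠ 0) : bN n = 10 * bN (n / 7) + DN (n % 7) := by
  rw [bN]; simp [h]

lemma DN_le_nine (k : ℕ) : DN k ≤ 9 := by
  rcases k with _|_|_|_|_|_|_|k <;> simp [DN, goodL, List.getD]

lemma DN_lt_ten (k : ℕ) : DN k < 10 := by have := DN_le_nine k; omega

lemma DN_mono {a b : ℕ} (h : a < b) (hb : b < 7) : DN a < DN b := by
  interval_cases b <;> interval_cases a <;> decide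

lemma DN_mem {k : ℕ} (hk : k < 7) : DN k ∈ goodL := by
  interval_cases k <;> decide

lemma bN_pos (n : ℕ) (h : 0 < n) : 0 < bN n := by
  induction n using Nat.strong_induction_on with
  | _ n ih =>
    rw [bN_eq n (by omega)]
    rcases Nat.eq_zero_or_pos (n % 7) with h7 | h7
    · have hq : 0 < n / 7 := by omega
      have := ih (n / 7) (Nat.div_lt_self h (by omega)) hq
      omega
    · have : 0 < DN (n % 7) := by
        have h7' : n % 7 < 7 := Nat.mod_lt _ (by omega)
        have := DN_mono (a := 0) (b := n % 7) h7 h7'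
        simpa [DN, goodL] using this
      omega

lemma bN_mono {a b : ℕ} (h : a < b) : bN a < bN b := by
  induction b using Nat.strong_induction_on generalizing a with
  | _ b ih =>
    have hb : b ≠ 0 := by omega
    rw [bN_eq b hb]
    by_cases ha : a = 0
    · subst ha; rw [bN_zero]
      have := bN_pos b (by omega)
      rw [bN_eq b hb] at this
      omega
    rw [bN_eq a ha]
    have hq : a / 7 ≤ b / 7 := Nat.div_le_div_right (by omega)
    rcases lt_or_eq_of_le hq with hq' | hq'
    · have h1 : bN (a / 7) < bN (b / 7) := ih (b / 7) (Nat.div_lt_self (by omega) (by omega)) hq'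
      have h2 := DN_le_nine (a % 7)
      omega
    · have h7 : a % 7 < b % 7 := by omega
      have := DN_mono h7 (Nat.mod_lt _ (by omega))
      rw [hq']
      omega

lemma bN_mono_le {a b : ℕ} (h : a ≤ b) : bN a ≤ bN b := by
  rcases lt_or_eq_of_le h with h' | rfl
  · exact le_of_lt (bN_mono h')
  · rfl

-- fuel bound: bN n < 10 ^ n, so 10 ^ (n+1) iterations always suffice
lemma bN_lt (n : ℕ) : bN n < 10 ^ n := by
  induction n using Nat.strong_induction_on with
  | _ n ih =>
    by_cases h : n = 0
    · subst h; simp [bN_zero]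
    rw [bN_eq n h]
    have h1 : bN (n / 7) < 10 ^ (n / 7) := ih (n / 7) (Nat.div_lt_self (by omega) (by omega))
    have h2 : DN (n % 7) ≤ 9 := DN_le_nine _
    have h3 : n / 7 + 1 ≤ n := by
      have := Nat.div_lt_self (Nat.pos_of_ne_zero h) (by omega : (1:ℕ) < 7)
      omega
    have h4 : (10:ℕ) ^ (n / 7 + 1) ≤ 10 ^ n := Nat.pow_le_pow_right (by omega) h3
    rw [pow_succ] at h4
    omega

-- every bN n is a good number
def goodN (m : ℕ) : Prop := ∀ d ∈ Nat.digits 10 m, d ∈ goodL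

lemma goodN_bN (n : ℕ) : goodN (bN n) := by
  induction n using Nat.strong_induction_on with
  | _ n ih =>
    by_cases h : n = 0
    · subst h; rw [bN_zero]; intro d hd; simp at hd
    rw [bN_eq n h]
    have hpos : 0 < 10 * bN (n / 7) + DN (n % 7) := by
      rw [← bN_eq n h]; exact bN_pos n (by omega)
    intro d hd
    rw [Nat.digits_def' (by norm_num) hpos] at hd
    have hDlt := DN_lt_ten (n % 7)
    have hmod : (10 * bN (n / 7) + DN (n % 7)) % 10 = DN (n % 7) := by omega
    have hdiv : (10 * bN (n / 7) + DN (n % 7)) / 10 = bN (n / 7) := by omega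
    rw [hmod, hdiv] at hd
    rcases List.mem_cons.mp hd with rfl | hd'
    · exact DN_mem (Nat.mod_lt _ (by omega))
    · exact ih (n / 7) (Nat.div_lt_self (by omega) (by omega)) d hd'

-- inverse digit map and inverse function: every good number is some bN m
def EN (d : ℕ) : ℕ := [0, 1, 2, 0, 0, 3, 4, 0, 5, 6].getD d 0

def cN (x : ℕ) : ℕ :=
  if _h : x = 0 then 0 else 7 * cN (x / 10) + EN (x % 10)
termination_by x
decreasing_by exact Nat.div_lt_self (by omega) (by omega)

lemma cN_eq (x : ℕ) (h : x ≠ 0) : cN x = 7 * cN (x / 10) + EN (x % 10) := by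
  rw [cN]; simp [h]

lemma EN_lt_seven (d : ℕ) (hd : d ∈ goodL) : EN d < 7 := by
  fin_cases hd <;> decide

lemma DN_EN (d : ℕ) (hd : d ∈ goodL) : DN (EN d) = d := by
  fin_cases hd <;> decide

lemma EN_pos (d : ℕ) (hd : d ∈ goodL) (h : d ≠ 0) : 0 < EN d := by
  fin_cases hd <;> simp_all <;> decide

lemma bN_cN (x : ℕ) (h : goodN x) : bN (cN x) = x ∧ (0 < x → 0 < cN x) := by
  induction x using Nat.strong_induction_on with
  | _ x ih =>
    by_cases hx : x = 0
    · subst hx; simp [cN, bN_zero]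
    have hpos : 0 < x := by omega
    have hdig := Nat.digits_def' (b := 10) (by norm_num) hpos
    have hmem : x % 10 ∈ goodL := h _ (by rw [hdig]; exact List.mem_cons_self)
    have htail : goodN (x / 10) := by
      intro d hd; exact h d (by rw [hdig]; exact List.mem_cons_of_mem _ hd)
    have hEN := EN_lt_seven _ hmem
    obtain ⟨ih1, ih2⟩ := ih (x / 10) (Nat.div_lt_self hpos (by omega)) htail
    rw [cN_eq _ hx]
    have hcpos : x % 10 ≠ 0 → 0 < EN (x % 10) := EN_pos _ hmem
    have hc0 : (0:ℕ) < 7 * cN (x / 10) + EN (x % 10) := by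
      by_cases hm : x % 10 = 0
      · have : 0 < x / 10 := by omega
        have := ih2 this
        omega
      · have := hcpos hm; omega
    constructor
    · rw [bN_eq _ (by omega)]
      have h7q : (7 * cN (x / 10) + EN (x % 10)) / 7 = cN (x / 10) := by omega
      have h7m : (7 * cN (x / 10) + EN (x % 10)) % 7 = EN (x % 10) := by omega
      rw [h7q, h7m, ih1, DN_EN _ hmem]
      omega
    · intro _; exact hc0

-- the only good number in (bN k, bN (k+1)] is bN (k+1)
lemma next_good (k x : ℕ) (h1 : bN k < x) (h2 : x ≤ bN (k + 1)) (hg : goodN x) :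
    x = bN (k + 1) := by
  have hx : 0 < x := by have := Nat.zero_le (bN k); omega
  obtain ⟨hb, hc⟩ := bN_cN x hg
  have hm := hc hx
  -- x = bN (cN x); compare cN x with k and k+1 via strict monotonicity
  have hgt : k < cN x := by
    by_contra hle
    have : cN x ≤ k := by omega
    rcases lt_or_eq_of_le this with hlt | heq
    · have := bN_mono hlt; omega
    · rw [heq] at hb; omega
  have hlt : cN x ≤ k + 1 := by
    by_contra hgt'
    have : k + 1 < cN x := by omega
    have := bN_mono this; omega
  have : cN x = k + 1 := by omega
  rw [← hb, this]

-- B's loop computes r + bN n * p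
lemma getD_DN (k : ℕ) : ([0, 1, 2, 5, 6, 8, 9] : List Int).getD k 0 = (DN k : Int) := by
  rcases k with _|_|_|_|_|_|_|k <;> simp [DN, goodL, List.getD]

lemma altLoop_eq (n r p : Int) (hn : 0 ≤ n) : altLoop n r p = r + (bN n.toNat : Int) * p := by
  by_cases h : 0 < n
  case neg =>
    rw [altLoop]; simp only [h, if_false]
    have : n.toNat = 0 := by omega
    rw [this, bN_zero]; simp
  case pos =>
    rw [altLoop]; simp only [h, if_true]
    have hfd : PySem.Int.floordiv n 7 = ((n.toNat / 7 : ℕ) : Int) := by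
      simp only [PySem.Int.floordiv]
      rw [Int.fdiv_eq_ediv]
      simp only [show ((0:Int) ≤ 7 ∨ (7:Int) ∣ n) = True by simp, if_true]
      omega
    have hfm : PySem.Int.mod n 7 = ((n.toNat % 7 : ℕ) : Int) := by
      simp only [PySem.Int.mod]
      rw [Int.fmod_eq_emod]
      omega
    rw [hfd, hfm, PySem.List.pyGetD_natCast, getD_DN]
    rw [altLoop_eq _ _ _ (by positivity)]
    have : ((n.toNat / 7 : ℕ) : Int).toNat = n.toNat / 7 := by omega
    rw [this, bN_eq n.toNat (by omega)]
    push_cast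
    ring
termination_by n.toNat
decreasing_by
  · omega


-- A's loop invariant: after i good numbers found, j has passed bN i but not bN (i+1)
lemma lcdGo_eq : ∀ (fuel : ℕ) (n i j : Int), 0 ≤ i → i ≤ n →
    (i = n → j = (bN n.toNat : Int) + 1) →
    ((bN i.toNat : Int) < j) → (j ≤ (bN (i.toNat + 1) : Int)) →
    ((bN n.toNat : Int) < j + fuel) →
    lcdGo fuel n i j = (bN n.toNat : Int) := by
  intro fuel
  induction fuel with
  | zero =>
    intro n i j h0 h1 h2 h3 h4 h5
    have hin : i = n := by
      by_contra hne
      have hlt : i.toNat + 1 ≤ n.toNat := by omega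
      have := bN_mono_le hlt
      omega
    simp only [lcdGo]
    rw [h2 hin]; ring
  | succ fuel ih =>
    intro n i j h0 h1 h2 h3 h4 h5
    simp only [lcdGo]
    by_cases hin : i = n
    · rw [if_pos hin, h2 hin]; ring
    rw [if_neg hin]
    have hj1 : 1 ≤ j := by
      have : (0:Int) ≤ (bN i.toNat : Int) := by positivity
      omega
    by_cases hg : pyGood j = true
    · rw [if_pos hg]
      have hgN : ∀ d ∈ Nat.digits 10 j.toNat, d ∈ goodL := (pyGood_iff j hj1).mp hg
      have hjeq : j.toNat = bN (i.toNat + 1) :=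
        next_good i.toNat j.toNat (by omega) (by omega) hgN
      have hi1 : (i + 1).toNat = i.toNat + 1 := by omega
      apply ih n (i + 1) (j + 1) (by omega) (by omega) ?_ ?_ ?_ (by omega)
      · intro he
        have : n.toNat = i.toNat + 1 := by omega
        rw [this]; omega
      · rw [hi1]; omega
      · rw [hi1]
        have := bN_mono (a := i.toNat + 1) (b := i.toNat + 1 + 1) (by omega)
        omega
    · rw [if_neg hg]
      have hgN : ¬ ∀ d ∈ Nat.digits 10 j.toNat, d ∈ goodL := by
        intro hc; exact absurd ((pyGood_iff j hj1).mpr hc) (by simp [hg])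
      have hne : j.toNat ≠ bN (i.toNat + 1) := by
        intro hc; exact hgN (by rw [hc]; exact goodN_bN _)
      apply ih n i (j + 1) h0 h1 (by omega) (by omega) (by omega) (by omega)

-- ===== VERDICT (by name: the statement is the Claim_ definition above) =====
theorem LCD_series_spec : Claim_equal_LCD_series := by
  intro n _ hpre
  unfold Spec_LCD_series LCD_series LCD_series_alt
  rw [altLoop_eq n 0 1 hpre]
  have h2 : (0:Int) = n → (1:Int) = (bN n.toNat : Int) + 1 := by
    intro h; rw [← h]; simp [bN_zero]
  have h3 : ((bN ((0:Int)).toNat : ℕ) : Int) < 1 := by simp [bN_zero]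
  have h4 : (1:Int) ≤ ((bN (((0:Int)).toNat + 1) : ℕ) : Int) := by
    have h1 : bN 1 = 1 := by rw [bN_eq 1 (by omega)]; simp [bN_zero]; decide
    simp [h1]
  have h5 : (bN n.toNat : Int) < 1 + (10 ^ (n.toNat + 1) : ℕ) := by
    have h6 := bN_lt n.toNat
    have hp : (10:ℕ) ^ n.toNat ≤ 10 ^ (n.toNat + 1) := Nat.pow_le_pow_right (by omega) (by omega)
    have h7 : (bN n.toNat : Int) < ((10 ^ (n.toNat + 1) : ℕ) : Int) := by exact_mod_cast by omega
    omega
  rw [lcdGo_eq (10 ^ (n.toNat + 1)) n 0 1 le_rfl hpre h2 h3 h4 h5]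
  ring
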